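-- pv_equiv track=rewrite | github.com/Freakingnolife/ai-debate-tool | src/ai_debate_tool/services/todo_writer.py | _create_active_form
-- ===== SOURCE A (Python) =====
-- def _create_active_form(title: str) -> str:
--     """
--     Convert title to present continuous form for activeForm.
--
--     Examples:
--         'Fix race condition' -> 'Fixing race condition'
--         'Add row locking' -> 'Adding row locking'
--         'Remove duplicate code' -> 'Removing duplicate code'
--         'Update documentation' -> 'Updating documentation'
--         'Unknown action' -> 'Working on unknown action'
--
--     Args:
--         title: Issue title (usually starts with verb)
--
--     Returns:
--         Present continuous form (verb + -ing)
--     """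
--     title_lower = title.lower().strip()
--
--     # Common verb patterns
--     verb_replacements = [
--         ('fix ', 'fixing '),
--         ('add ', 'adding '),
--         ('remove ', 'removing '),
--         ('update ', 'updating '),
--         ('create ', 'creating '),
--         ('delete ', 'deleting '),
--         ('implement ', 'implementing '),
--         ('refactor ', 'refactoring '),
--         ('improve ', 'improving '),
--         ('optimize ', 'optimizing '),
--         ('debug ', 'debugging '),
--         ('test ', 'testing '),
--         ('write ', 'writing '),
--         ('read ', 'reading '),
--         ('check ', 'checking '),
--         ('verify ', 'verifying '),
--         ('validate ', 'validating '),
--         ('migrate ', 'migrating '),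
--         ('upgrade ', 'upgrading '),
--         ('downgrade ', 'downgrading '),
--     ]
--
--     # Try to replace known verb patterns
--     for verb, gerund in verb_replacements:
--         if title_lower.startswith(verb):
--             # Preserve original case for rest of title
--             return gerund.capitalize() + title[len(verb):]
--
--     # Default: prepend "Working on"
--     return f"Working on {title.lower()}"
-- ===== SOURCE B (Python) =====
-- # Derives each gerund morphologically from a verb set (drop silent 'e', double
-- # 'debug''s final consonant) instead of storing 20 gerund strings and scanning them.
-- _VERBS = frozenset((
--     'fix', 'add', 'remove', 'update', 'create', 'delete', 'implement',
--     'refactor', 'improve', 'optimize', 'debug', 'test', 'write', 'read',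
--     'check', 'verify', 'validate', 'migrate', 'upgrade', 'downgrade'))
-- _DOUBLE_FINAL = frozenset(('debug',))
--
--
-- def _create_active_form(title: str) -> str:
--     head, sep, _ = title.lower().strip().partition(' ')
--     if sep and head in _VERBS:
--         if head.endswith('e'):
--             stem = head[:-1]
--         elif head in _DOUBLE_FINAL:
--             stem = head + head[-1]
--         else:
--             stem = head
--         return stem.capitalize() + 'ing ' + title[len(head) + 1:]
--     return f"Working on {title.lower()}"
-- ===== Notes on version B (the rewrite author's own statement) =====
-- stated objective: simpler
-- what changed: Instead of scanning a stored table of 20 (verb, gerund) string pairs with startswith, B splits off the first word with partition, checks it against a verb set, and derives the gerund morphologically at runtime (drop a silent trailing 'e', double 'debug''s final consonant, append 'ing').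
import Mathlib
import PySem

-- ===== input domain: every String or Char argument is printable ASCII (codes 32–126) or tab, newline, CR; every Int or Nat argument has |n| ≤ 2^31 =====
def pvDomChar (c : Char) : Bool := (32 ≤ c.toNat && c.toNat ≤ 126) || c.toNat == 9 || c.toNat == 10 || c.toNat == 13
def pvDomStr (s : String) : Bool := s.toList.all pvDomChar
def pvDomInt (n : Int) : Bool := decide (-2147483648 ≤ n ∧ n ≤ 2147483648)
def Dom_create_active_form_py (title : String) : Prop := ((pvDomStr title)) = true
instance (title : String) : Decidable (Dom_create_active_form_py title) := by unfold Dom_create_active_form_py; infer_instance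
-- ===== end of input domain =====

-- B splits off the first word with partition, tests it against a verb set, and derives the
-- gerund morphologically (drop trailing 'e', double 'debug''s 'g', append "ing ") instead of
-- scanning A's stored (verb, gerund) table (objective: simpler).


-- ===== PORT A =====
-- str.capitalize, hand-ported (both Pythons apply it to lowercase ASCII only): first char upper-cased, rest lower-cased — exact there
def pyCapitalizeChars (cs : List Char) : List Char :=
  match cs with
  | [] => []
  | c :: t => PySem.Chars.upperChar c :: PySem.Chars.lower t

def pvVerbReplacements : List (List Char × List Char) :=
  [(['f', 'i', 'x', ' '], ['f', 'i', 'x', 'i', 'n', 'g', ' ']), (['a', 'd', 'd', ' '], ['a', 'd', 'd', 'i', 'n', 'g', ' ']),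
   (['r', 'e', 'm', 'o', 'v', 'e', ' '], ['r', 'e', 'm', 'o', 'v', 'i', 'n', 'g', ' ']), (['u', 'p', 'd', 'a', 't', 'e', ' '], ['u', 'p', 'd', 'a', 't', 'i', 'n', 'g', ' ']),
   (['c', 'r', 'e', 'a', 't', 'e', ' '], ['c', 'r', 'e', 'a', 't', 'i', 'n', 'g', ' ']), (['d', 'e', 'l', 'e', 't', 'e', ' '], ['d', 'e', 'l', 'e', 't', 'i', 'n', 'g', ' ']),
   (['i', 'm', 'p', 'l', 'e', 'm', 'e', 'n', 't', ' '], ['i', 'm', 'p', 'l', 'e', 'm', 'e', 'n', 't', 'i', 'n', 'g', ' ']), (['r', 'e', 'f', 'a', 'c', 't', 'o', 'r', ' '], ['r', 'e', 'f', 'a', 'c', 't', 'o', 'r', 'i', 'n', 'g', ' ']),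
   (['i', 'm', 'p', 'r', 'o', 'v', 'e', ' '], ['i', 'm', 'p', 'r', 'o', 'v', 'i', 'n', 'g', ' ']), (['o', 'p', 't', 'i', 'm', 'i', 'z', 'e', ' '], ['o', 'p', 't', 'i', 'm', 'i', 'z', 'i', 'n', 'g', ' ']),
   (['d', 'e', 'b', 'u', 'g', ' '], ['d', 'e', 'b', 'u', 'g', 'g', 'i', 'n', 'g', ' ']), (['t', 'e', 's', 't', ' '], ['t', 'e', 's', 't', 'i', 'n', 'g', ' ']),
   (['w', 'r', 'i', 't', 'e', ' '], ['w', 'r', 'i', 't', 'i', 'n', 'g', ' ']), (['r', 'e', 'a', 'd', ' '], ['r', 'e', 'a', 'd', 'i', 'n', 'g', ' ']),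
   (['c', 'h', 'e', 'c', 'k', ' '], ['c', 'h', 'e', 'c', 'k', 'i', 'n', 'g', ' ']), (['v', 'e', 'r', 'i', 'f', 'y', ' '], ['v', 'e', 'r', 'i', 'f', 'y', 'i', 'n', 'g', ' ']),
   (['v', 'a', 'l', 'i', 'd', 'a', 't', 'e', ' '], ['v', 'a', 'l', 'i', 'd', 'a', 't', 'i', 'n', 'g', ' ']), (['m', 'i', 'g', 'r', 'a', 't', 'e', ' '], ['m', 'i', 'g', 'r', 'a', 't', 'i', 'n', 'g', ' ']),
   (['u', 'p', 'g', 'r', 'a', 'd', 'e', ' '], ['u', 'p', 'g', 'r', 'a', 'd', 'i', 'n', 'g', ' ']), (['d', 'o', 'w', 'n', 'g', 'r', 'a', 'd', 'e', ' '], ['d', 'o', 'w', 'n', 'g', 'r', 'a', 'd', 'i', 'n', 'g', ' '])]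

-- the 'for verb, gerund in verb_replacements' loop with its early return
def pvScanA (title_lower title : List Char) : List (List Char × List Char) → List Char
  | [] => ['W', 'o', 'r', 'k', 'i', 'n', 'g', ' ', 'o', 'n', ' '] ++ PySem.Chars.lower title
  | (verb, gerund) :: rest =>
    if PySem.Chars.startswith title_lower verb then
      pyCapitalizeChars gerund ++ PySem.Chars.slice title (some (verb.length : Int)) none
    else pvScanA title_lower title rest

def create_active_form_py (title : String) : String :=
  String.ofList
    (pvScanA (PySem.Chars.strip (PySem.Chars.lower title.toList)) title.toList pvVerbReplacements)

-- ===== PORT B =====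
def pvVerbs : PySem.Set (List Char) :=
  PySem.Set.ofList
    [['f','i','x'], ['a','d','d'], ['r','e','m','o','v','e'], ['u','p','d','a','t','e'],
     ['c','r','e','a','t','e'], ['d','e','l','e','t','e'], ['i','m','p','l','e','m','e','n','t'],
     ['r','e','f','a','c','t','o','r'], ['i','m','p','r','o','v','e'], ['o','p','t','i','m','i','z','e'],
     ['d','e','b','u','g'], ['t','e','s','t'], ['w','r','i','t','e'], ['r','e','a','d'],
     ['c','h','e','c','k'], ['v','e','r','i','f','y'], ['v','a','l','i','d','a','t','e'],
     ['m','i','g','r','a','t','e'], ['u','p','g','r','a','d','e'], ['d','o','w','n','g','r','a','d','e']]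

def pvDoubleFinal : PySem.Set (List Char) := PySem.Set.ofList [['d','e','b','u','g']]

-- str.partition(' '), hand-ported (exact): (chars before the first space, was a space found);
-- B discards the tail component, so it is not materialised
def pvPartitionSp : List Char → List Char × Bool
  | [] => ([], false)
  | c :: t =>
    if c = ' ' then ([], true)
    else (c :: (pvPartitionSp t).1, (pvPartitionSp t).2)

def pvBodyB (title : List Char) : List Char :=
  let pr := pvPartitionSp (PySem.Chars.strip (PySem.Chars.lower title))
  let head := pr.1
  if pr.2 && PySem.Set.contains pvVerbs head then
    let stem :=
      if PySem.Chars.endswith head ['e'] then PySem.List.slice head none (some (-1))  -- head[:-1]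
      else if PySem.Set.contains pvDoubleFinal head then
        head ++ (PySem.List.pyGet? head (-1)).toList  -- head + head[-1]; head nonempty here, so pyGet? is some
      else head
    pyCapitalizeChars stem ++ ['i','n','g',' '] ++ PySem.Chars.slice title (some ((head.length : Int) + 1)) none
  else ['W','o','r','k','i','n','g',' ','o','n',' '] ++ PySem.Chars.lower title

def create_active_form_py_alt (title : String) : String :=
  String.ofList (pvBodyB title.toList)

-- ===== PRECONDITION & SPEC =====
def Spec_create_active_form_py (title : String) (out : String) : Prop := out = create_active_form_py_alt title
instance (title : String) (out : String) : Decidable (Spec_create_active_form_py title out) := by unfold Spec_create_active_form_py; infer_instance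

-- ===== CLAIM (what is proved, stated in full; the proofs are below) =====
def Claim_equal_create_active_form_py : Prop := ∀ (title : String), Dom_create_active_form_py title → Spec_create_active_form_py title (create_active_form_py title)

-- ===== LEMMAS AND PROOFS =====

theorem pvCond (tl : List Char) (k : Nat) (hk : tl[k]? = some ' ')
    (hmin : ∀ i < k, tl[i]? ≠ some ' ')
    (w : List Char) (hw : ∀ c ∈ w, c ≠ ' ') :
    ((w ++ [' ']) <+: tl) ↔ tl.take (k+1) = w ++ [' '] := by
  constructor
  · intro h
    have htake : tl.take (w.length + 1) = w ++ [' '] := by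
      have := (List.prefix_iff_eq_take).mp h
      simpa using this.symm
    have hkw : k = w.length := by
      by_contra hne
      rcases Nat.lt_or_ge k w.length with hlt | hge
      · have heq : tl[k]? = w[k]? := by
          have h1 : (tl.take (w.length+1))[k]? = tl[k]? := by
            rw [List.getElem?_take_of_lt]; omega
          have h2 : (w ++ [' '])[k]? = w[k]? := by
            rw [List.getElem?_append_left]; omega
          rw [← h1, htake, h2]
        have hwk : w[k]? = some ' ' := by rw [← heq]; exact hk
        have hsp : w[k]'hlt = ' ' := by
          have := List.getElem?_eq_getElem hlt ▸ hwk
          simpa using this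
        exact hw _ (List.getElem_mem _) hsp
      · have hlt : w.length < k := by omega
        apply hmin w.length hlt
        have h1 : (tl.take (w.length+1))[w.length]? = tl[w.length]? := by
          rw [List.getElem?_take_of_lt]; omega
        rw [← h1, htake]
        simp
    rw [hkw]; exact htake
  · intro h
    rw [← h]
    exact List.take_prefix _ _

theorem pvNoSpace (tl title : List Char) (hno : ¬ ([' '] <:+: tl)) :
    pvScanA tl title pvVerbReplacements = ['W', 'o', 'r', 'k', 'i', 'n', 'g', ' ', 'o', 'n', ' '] ++ PySem.Chars.lower title := by
  have hsw : ∀ v : List Char, ' ' ∈ v → PySem.Chars.startswith tl v = false := by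
    intro v hv
    rcases Bool.eq_false_or_eq_true (PySem.Chars.startswith tl v) with h | h
    swap
    · exact h
    · exact absurd (List.IsInfix.trans ((List.singleton_infix_iff _ _).mpr hv)
        ((PySem.Chars.startswith_iff tl v).mp h).isInfix) hno
  simp [pvVerbReplacements, pvScanA, hsw]

theorem pvPart_false : ∀ tl : List Char, (pvPartitionSp tl).2 = false →
    (pvPartitionSp tl).1 = tl ∧ ' ' ∉ tl := by
  intro tl
  induction tl with
  | nil => simp [pvPartitionSp]
  | cons c t ih =>
    by_cases hc : c = ' '
    · subst hc; simp [pvPartitionSp]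
    · simp only [pvPartitionSp, if_neg hc]
      intro h2
      obtain ⟨h1, hm⟩ := ih h2
      refine ⟨by rw [h1], ?_⟩
      simp [hm, Ne.symm hc]

theorem pvPart_true : ∀ tl : List Char, (pvPartitionSp tl).2 = true →
    ∃ rest, tl = (pvPartitionSp tl).1 ++ ' ' :: rest ∧ ' ' ∉ (pvPartitionSp tl).1 := by
  intro tl
  induction tl with
  | nil => simp [pvPartitionSp]
  | cons c t ih =>
    by_cases hc : c = ' '
    · subst hc; intro _; exact ⟨t, by simp [pvPartitionSp]⟩
    · simp only [pvPartitionSp, if_neg hc]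
      intro h2
      obtain ⟨rest, heq, hm⟩ := ih h2
      refine ⟨rest, ?_, ?_⟩
      · conv_lhs => rw [heq]
        simp
      · simp [hm, Ne.symm hc]

theorem pvSW (head rest w : List Char) (hh : ' ' ∉ head) (hw : ∀ c ∈ w, c ≠ ' ') :
    PySem.Chars.startswith (head ++ ' ' :: rest) (w ++ [' ']) = (w == head) := by
  have hk : (head ++ ' ' :: rest)[head.length]? = some ' ' := by
    rw [List.getElem?_append_right (le_refl _)]; simp
  have hmin : ∀ i < head.length, (head ++ ' ' :: rest)[i]? ≠ some ' ' := by
    intro i hi hcontra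
    rw [List.getElem?_append_left hi] at hcontra
    obtain ⟨hlt, heqc⟩ := List.getElem?_eq_some_iff.mp hcontra
    exact hh (heqc ▸ List.getElem_mem _)
  have htake : (head ++ ' ' :: rest).take (head.length+1) = head ++ [' '] := by
    rw [List.take_append]
    simp
  rw [Bool.eq_iff_iff, beq_iff_eq,
    PySem.Chars.startswith_iff, pvCond _ head.length hk hmin w hw, htake]
  constructor
  · intro h; exact ((List.append_left_inj _).mp h.symm)
  · intro h; rw [h]

set_option maxRecDepth 4096 in
theorem pvVerbsShape :
    ∀ p ∈ pvVerbReplacements, (∀ c ∈ p.1.dropLast, c ≠ ' ') ∧ p.1.getLast? = some ' ' := by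
  intro p hp
  simp only [pvVerbReplacements, List.mem_cons, List.not_mem_nil, or_false] at hp
  rcases hp with rfl|rfl|rfl|rfl|rfl|rfl|rfl|rfl|rfl|rfl|rfl|rfl|rfl|rfl|rfl|rfl|rfl|rfl|rfl|rfl <;>
    exact ⟨by simp, rfl⟩

theorem pvScanFind (head rest title : List Char) (hh : ' ' ∉ head) :
    ∀ ps : List (List Char × List Char),
      (∀ p ∈ ps, (∀ c ∈ p.1.dropLast, c ≠ ' ') ∧ p.1.getLast? = some ' ') →
      pvScanA (head ++ ' ' :: rest) title ps =
        match ps.find? (fun p => p.1 == head ++ [' ']) with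
        | some p => pyCapitalizeChars p.2 ++ PySem.Chars.slice title (some (p.1.length : Int)) none
        | none => ['W','o','r','k','i','n','g',' ','o','n',' '] ++ PySem.Chars.lower title := by
  intro ps
  induction ps with
  | nil => intro _; simp [pvScanA]
  | cons p restps ih =>
    intro hps
    obtain ⟨v, g⟩ := p
    obtain ⟨hw, hlast⟩ := hps _ List.mem_cons_self
    dsimp only at hw hlast
    obtain ⟨w, hw2, rfl⟩ : ∃ w, (∀ c ∈ w, c ≠ ' ') ∧ v = w ++ [' '] :=
      ⟨v.dropLast, hw, by conv_lhs => rw [← List.dropLast_append_getLast? _ hlast]⟩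
    have hbeq : ((w ++ [' ']) == (head ++ [' '])) = (w == head) := by
      rw [Bool.eq_iff_iff, beq_iff_eq, beq_iff_eq]
      exact List.append_left_inj _
    rw [pvScanA, pvSW head rest w hh hw2, List.find?]
    dsimp only
    rw [hbeq]
    cases hcmp : (w == head) with
    | false =>
      simp only [Bool.false_eq_true, if_false]
      exact ih (fun q hq => hps q (List.mem_cons_of_mem _ hq))
    | true =>
      simp

set_option maxRecDepth 8192 in
theorem pvKeysVerbs : ∀ p ∈ pvVerbReplacements, p.1.dropLast ∈ pvVerbs := by decide

set_option maxRecDepth 8192 in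
theorem pvFact : ∀ v ∈ pvVerbs,
    ((pvVerbReplacements.find? (fun p => p.1 == v ++ [' '])).map
      (fun p => (pyCapitalizeChars p.2, (p.1.length : Int))))
    = some (pyCapitalizeChars
        (if PySem.Chars.endswith v ['e'] then PySem.List.slice v none (some (-1))
         else if PySem.Set.contains pvDoubleFinal v then v ++ (PySem.List.pyGet? v (-1)).toList
         else v) ++ ['i','n','g',' '], (v.length : Int) + 1) := by decide

theorem pvFindB (head title : List Char) :
    (match pvVerbReplacements.find? (fun p => p.1 == head ++ [' ']) with
     | some p => pyCapitalizeChars p.2 ++ PySem.Chars.slice title (some (p.1.length : Int)) none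
     | none => ['W','o','r','k','i','n','g',' ','o','n',' '] ++ PySem.Chars.lower title)
    = (if PySem.Set.contains pvVerbs head then
        pyCapitalizeChars
          (if PySem.Chars.endswith head ['e'] then PySem.List.slice head none (some (-1))
           else if PySem.Set.contains pvDoubleFinal head then head ++ (PySem.List.pyGet? head (-1)).toList
           else head) ++ (['i','n','g',' '] ++ PySem.Chars.slice title (some ((head.length : Int) + 1)) none)
      else ['W','o','r','k','i','n','g',' ','o','n',' '] ++ PySem.Chars.lower title) := by
  have hciff : PySem.Set.contains pvVerbs head = true ↔ head ∈ pvVerbs := by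
    simp [PySem.Set.contains]
  by_cases hm : head ∈ pvVerbs
  · rw [if_pos (hciff.mpr hm)]
    obtain ⟨p, hp, hmap⟩ := Option.map_eq_some_iff.mp (pvFact head hm)
    rw [hp]
    dsimp only
    have h1 : pyCapitalizeChars p.2 = pyCapitalizeChars
          (if PySem.Chars.endswith head ['e'] then PySem.List.slice head none (some (-1))
           else if PySem.Set.contains pvDoubleFinal head then head ++ (PySem.List.pyGet? head (-1)).toList
           else head) ++ ['i','n','g',' '] := congrArg Prod.fst hmap
    have h2 : ((p.1.length : Int)) = (head.length : Int) + 1 := congrArg Prod.snd hmap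
    rw [h1, h2, List.append_assoc]
  · rw [if_neg (fun hc => hm (hciff.mp hc))]
    have hnone : pvVerbReplacements.find? (fun p => p.1 == head ++ [' ']) = none := by
      rw [List.find?_eq_none]
      intro p hp hbeq
      have hpe : p.1 = head ++ [' '] := by simpa using hbeq
      have hdl : p.1.dropLast = head := by rw [hpe]; simp
      exact hm (hdl ▸ pvKeysVerbs p hp)
    rw [hnone]

theorem pvMain (title : List Char) :
    pvScanA (PySem.Chars.strip (PySem.Chars.lower title)) title pvVerbReplacements
      = pvBodyB title := by
  simp only [pvBodyB]
  set tl := PySem.Chars.strip (PySem.Chars.lower title) with htl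
  cases h2 : (pvPartitionSp tl).2 with
  | false =>
    obtain ⟨_, hmem⟩ := pvPart_false tl h2
    have hno : ¬ ([' '] <:+: tl) := fun h => hmem ((List.singleton_infix_iff _ _).mp h)
    rw [pvNoSpace tl title hno]
    simp
  | true =>
    obtain ⟨rest, heq, hh⟩ := pvPart_true tl h2
    conv_lhs => rw [heq]
    rw [pvScanFind _ rest title hh pvVerbReplacements pvVerbsShape, pvFindB]
    simp

-- ===== VERDICT (by name: the statement is the Claim_ definition above) =====
theorem create_active_form_py_spec : Claim_equal_create_active_form_py := by
  intro title _
  unfold Spec_create_active_form_py create_active_form_py create_active_form_py_alt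
  rw [pvMain]
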